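-- pv_equiv track=rewrite | github.com/iov147259/vk_app | vk_app.py | to_arr_of_active
-- ===== SOURCE A (Python) =====
-- def to_arr_of_active(arr_active_tuples):
--     result = [0, 0, 0, 0, 0]
--     for act in arr_active_tuples:
--         if act[0] == "likes":
--             result[0] = act[1]
--         if act[0] == "subscribed":
--             result[1] = act[1]
--         if act[0] == "unsubscribed":
--             result[2] = act[1]
--         if act[0] == "comments":
--             result[3] = act[1]
--         if act[0] == "copies":
--             result[4] = act[1]
--     return result
-- ===== SOURCE B (Python) =====
-- def to_arr_of_active(arr_active_tuples):
--     def last_value(key):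
--         for act in reversed(arr_active_tuples):
--             if act[0] == key:
--                 return act[1]
--         return 0
--     return [last_value(k) for k in ("likes", "subscribed", "unsubscribed", "comments", "copies")]
-- ===== Notes on version B (the rewrite author's own statement) =====
-- stated objective: alternative
-- what changed: Replaces A's single stateful pass mutating a fixed array with five independent backward searches: for each fixed key, scan the reversed list for the first match (= last occurrence, preserving last-wins) and default to 0.
import Mathlib
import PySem

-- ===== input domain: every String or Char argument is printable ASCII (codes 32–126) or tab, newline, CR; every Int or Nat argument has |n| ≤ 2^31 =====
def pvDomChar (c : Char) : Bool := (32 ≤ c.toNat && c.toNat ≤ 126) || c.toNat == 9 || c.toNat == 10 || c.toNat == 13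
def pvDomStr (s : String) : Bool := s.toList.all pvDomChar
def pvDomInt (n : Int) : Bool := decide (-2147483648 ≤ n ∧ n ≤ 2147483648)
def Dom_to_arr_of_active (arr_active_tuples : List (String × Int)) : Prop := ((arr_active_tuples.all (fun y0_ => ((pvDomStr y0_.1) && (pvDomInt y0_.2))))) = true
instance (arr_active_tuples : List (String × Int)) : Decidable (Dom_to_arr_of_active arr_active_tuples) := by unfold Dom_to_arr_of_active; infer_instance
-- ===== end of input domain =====

-- B replaces A's single stateful pass over a mutated fixed array with five independent backward searches (first match in the reversed list per fixed key, default 0); alternative decomposition, same last-wins semantics.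


-- ===== PORT A =====
def to_arr_of_active (arr_active_tuples : List (String × Int)) : List Int :=
  arr_active_tuples.foldl
    (fun result act =>
      let result := if act.1 = "likes" then result.set 0 act.2 else result
      let result := if act.1 = "subscribed" then result.set 1 act.2 else result
      let result := if act.1 = "unsubscribed" then result.set 2 act.2 else result
      let result := if act.1 = "comments" then result.set 3 act.2 else result
      let result := if act.1 = "copies" then result.set 4 act.2 else result
      result)
    [0, 0, 0, 0, 0]

-- ===== PORT B =====
-- the for-loop with early return over reversed(arr) is find? on the reversed list (exact)
def pvLastValue (arr : List (String × Int)) (key : String) : Int :=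
  match arr.reverse.find? (fun act => act.1 == key) with
  | some act => act.2
  | none => 0

def to_arr_of_active_alt (arr_active_tuples : List (String × Int)) : List Int :=
  ["likes", "subscribed", "unsubscribed", "comments", "copies"].map
    (fun k => pvLastValue arr_active_tuples k)

-- ===== PRECONDITION & SPEC =====
def Spec_to_arr_of_active (arr_active_tuples : List (String × Int)) (out : List Int) : Prop := out = to_arr_of_active_alt arr_active_tuples
instance (arr_active_tuples : List (String × Int)) (out : List Int) : Decidable (Spec_to_arr_of_active arr_active_tuples out) := by unfold Spec_to_arr_of_active; infer_instance

-- ===== CLAIM (what is proved, stated in full; the proofs are below) =====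
def Claim_equal_to_arr_of_active : Prop := ∀ (arr_active_tuples : List (String × Int)), Dom_to_arr_of_active arr_active_tuples → Spec_to_arr_of_active arr_active_tuples (to_arr_of_active arr_active_tuples)

-- ===== LEMMAS AND PROOFS =====

-- last occurrence of key in l, with default d
def pvLastD (l : List (String × Int)) (key : String) (d : Int) : Int :=
  match l.reverse.find? (fun act => act.1 == key) with
  | some act => act.2
  | none => d

theorem pvLastD_cons (x : String × Int) (l : List (String × Int)) (key : String) (d : Int) :
    pvLastD (x :: l) key d = pvLastD l key (if x.1 = key then x.2 else d) := by
  simp only [pvLastD, List.reverse_cons, List.find?_append]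
  cases h : l.reverse.find? (fun act => act.1 == key) with
  | some a => simp [Option.orElse]
  | none =>
    by_cases hk : x.1 = key
    · have : (x.1 == key) = true := by simpa using hk
      simp [List.find?, this, hk]
    · have : (x.1 == key) = false := by simpa using hk
      simp [List.find?, this, hk]

-- loop invariant: A's fold from any 5-element initial array computes the five last occurrences
theorem pvInvariant (l : List (String × Int)) (a b c d e : Int) :
    l.foldl
      (fun result act =>
        let result := if act.1 = "likes" then result.set 0 act.2 else result
        let result := if act.1 = "subscribed" then result.set 1 act.2 else result
        let result := if act.1 = "unsubscribed" then result.set 2 act.2 else result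
        let result := if act.1 = "comments" then result.set 3 act.2 else result
        let result := if act.1 = "copies" then result.set 4 act.2 else result
        result)
      [a, b, c, d, e]
    = [pvLastD l "likes" a, pvLastD l "subscribed" b, pvLastD l "unsubscribed" c,
       pvLastD l "comments" d, pvLastD l "copies" e] := by
  induction l generalizing a b c d e with
  | nil => simp [pvLastD]
  | cons x rest ih =>
    obtain ⟨k, v⟩ := x
    simp only [List.foldl_cons, pvLastD_cons]
    by_cases h1 : k = "likes"
    · subst h1; simpa [List.set] using ih v b c d e
    by_cases h2 : k = "subscribed"
    · subst h2; simpa [List.set] using ih a v c d e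
    by_cases h3 : k = "unsubscribed"
    · subst h3; simpa [List.set] using ih a b v d e
    by_cases h4 : k = "comments"
    · subst h4; simpa [List.set] using ih a b c v e
    by_cases h5 : k = "copies"
    · subst h5; simpa [List.set] using ih a b c d v
    simpa [h1, h2, h3, h4, h5] using ih a b c d e

-- ===== VERDICT (by name: the statement is the Claim_ definition above) =====
theorem to_arr_of_active_spec : Claim_equal_to_arr_of_active := by
  intro l _
  show to_arr_of_active l = to_arr_of_active_alt l
  simpa [to_arr_of_active, to_arr_of_active_alt, pvLastValue, pvLastD] using
    pvInvariant l 0 0 0 0 0
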